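-- pv_equiv track=rewrite | github.com/daxzio/PeakRDL-etana | tests/test_only_external_blocks/test_dut.py | _apply_biten
-- ===== SOURCE A (Python) =====
-- def _apply_biten(old: int, new: int, biten: int) -> int:
--     out = old
--     for bit in range(32):
--         if (biten >> bit) & 1:
--             if (new >> bit) & 1:
--                 out |= 1 << bit
--             else:
--                 out &= ~(1 << bit)
--     return out
-- ===== SOURCE B (Python) =====
-- def _apply_biten(old: int, new: int, biten: int) -> int:
--     m = biten & 0xFFFFFFFF
--     return (old & ~m) | (new & m)
-- ===== Notes on version B (the rewrite author's own statement) =====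
-- stated objective: simpler
-- what changed: Replaced the 32-iteration per-bit set/clear loop by a single closed-form mask expression (old & ~m) | (new & m) with m = biten & 0xFFFFFFFF.
import Mathlib
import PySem

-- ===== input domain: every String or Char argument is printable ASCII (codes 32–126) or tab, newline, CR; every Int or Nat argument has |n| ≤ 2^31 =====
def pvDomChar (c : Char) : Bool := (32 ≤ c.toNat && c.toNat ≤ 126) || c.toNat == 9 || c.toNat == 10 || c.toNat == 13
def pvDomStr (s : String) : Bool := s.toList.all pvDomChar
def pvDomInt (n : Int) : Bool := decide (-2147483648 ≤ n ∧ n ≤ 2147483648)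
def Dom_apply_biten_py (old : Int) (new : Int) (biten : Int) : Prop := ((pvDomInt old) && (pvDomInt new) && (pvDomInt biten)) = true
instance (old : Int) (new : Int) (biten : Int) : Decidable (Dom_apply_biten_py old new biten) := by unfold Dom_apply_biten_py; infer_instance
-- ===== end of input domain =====

-- B replaces A's 32-iteration per-bit set/clear loop by the closed-form mask merge (old & ~m) | (new & m), m = biten & 0xFFFFFFFF (simpler).


-- ===== PORT A =====
-- one loop step of A: 'if (biten >> bit) & 1: if (new >> bit) & 1: out |= 1 << bit else: out &= ~(1 << bit)'
def applyBitenStep (new : Int) (biten : Int) (out : Int) (bit : Int) : Int :=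
  if Int.land (biten >>> bit) 1 ≠ 0 then
    if Int.land (new >>> bit) 1 ≠ 0 then Int.lor out (1 <<< bit)
    else Int.land out (Int.lnot (1 <<< bit))
  else out

def apply_biten_py (old : Int) (new : Int) (biten : Int) : Int :=
  (PySem.List.pyRange 0 32 1).foldl (applyBitenStep new biten) old

-- ===== PORT B =====
def apply_biten_py_alt (old : Int) (new : Int) (biten : Int) : Int :=
  let m := Int.land biten 4294967295
  Int.lor (Int.land old (Int.lnot m)) (Int.land new m)

-- ===== PRECONDITION & SPEC =====
def Spec_apply_biten_py (old : Int) (new : Int) (biten : Int) (out : Int) : Prop := out = apply_biten_py_alt old new biten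
instance (old : Int) (new : Int) (biten : Int) (out : Int) : Decidable (Spec_apply_biten_py old new biten out) := by unfold Spec_apply_biten_py; infer_instance

-- ===== CLAIM (what is proved, stated in full; the proofs are below) =====
def Claim_equal_apply_biten_py : Prop := ∀ (old : Int) (new : Int) (biten : Int), Dom_apply_biten_py old new biten → Spec_apply_biten_py old new biten (apply_biten_py old new biten)

-- ===== LEMMAS AND PROOFS =====

-- Two integers with the same bits (in Int.testBit's two's-complement sense) are equal.
theorem int_eq_of_testBit_eq {x y : Int} (h : ∀ i, x.testBit i = y.testBit i) : x = y := by
  cases x with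
  | ofNat m =>
    cases y with
    | ofNat n =>
      exact congrArg Int.ofNat (Nat.eq_of_testBit_eq fun i => h i)
    | negSucc n =>
      exfalso
      have h1 : Nat.testBit m (m + n) = false :=
        Nat.testBit_lt_two_pow (lt_of_lt_of_le Nat.lt_two_pow_self (Nat.pow_le_pow_right (by omega) (by omega)))
      have h2 : Nat.testBit n (m + n) = false :=
        Nat.testBit_lt_two_pow (lt_of_lt_of_le Nat.lt_two_pow_self (Nat.pow_le_pow_right (by omega) (by omega)))
      have := h (m + n)
      simp [Int.testBit, h1, h2] at this
  | negSucc m =>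
    cases y with
    | ofNat n =>
      exfalso
      have h1 : Nat.testBit m (m + n) = false :=
        Nat.testBit_lt_two_pow (lt_of_lt_of_le Nat.lt_two_pow_self (Nat.pow_le_pow_right (by omega) (by omega)))
      have h2 : Nat.testBit n (m + n) = false :=
        Nat.testBit_lt_two_pow (lt_of_lt_of_le Nat.lt_two_pow_self (Nat.pow_le_pow_right (by omega) (by omega)))
      have := h (m + n)
      simp [Int.testBit, h1, h2] at this
    | negSucc n =>
      have : ∀ i, Nat.testBit m i = Nat.testBit n i := by
        intro i
        have := h i
        simpa [Int.testBit] using this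
      exact congrArg Int.negSucc (Nat.eq_of_testBit_eq this)

-- bit 0 of x >> j is bit j of x
theorem testBit_shiftRight_zero (x : Int) (j : Nat) :
    Int.testBit (x >>> (j : Int)) 0 = x.testBit j := by
  cases x with
  | ofNat m =>
    rw [show ((Int.ofNat m : Int)) = ((m : Nat) : Int) from rfl, Int.shiftRight_natCast]
    show Nat.testBit (m >>> j) 0 = Nat.testBit m j
    rw [Nat.testBit_shiftRight, Nat.add_zero]
  | negSucc m =>
    rw [Int.shiftRight_negSucc]
    show (!Nat.testBit (m >>> j) 0) = !Nat.testBit m j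
    rw [Nat.testBit_shiftRight, Nat.add_zero]

-- 'y & 1' is nonzero exactly when bit 0 of y is set (Python truthiness of '(x >> bit) & 1')
theorem land_one_ne_zero (y : Int) : (Int.land y 1 ≠ 0) ↔ y.testBit 0 = true := by
  cases y with
  | ofNat m =>
    show ((↑(m &&& 1) : Int) ≠ 0) ↔ Nat.testBit m 0 = true
    rw [Nat.and_one_is_mod]
    rcases Nat.mod_two_eq_zero_or_one m with hm | hm <;>
      simp [hm, Nat.testBit]
  | negSucc m =>
    show ((↑(Nat.ldiff 1 m) : Int) ≠ 0) ↔ (!Nat.testBit m 0) = true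
    have : Nat.ldiff 1 m = if Nat.testBit m 0 then 0 else 1 := by
      apply Nat.eq_of_testBit_eq
      intro i
      rw [Nat.testBit_ldiff]
      rcases Nat.eq_zero_or_pos i with hi | hi
      · subst hi; cases hm : Nat.testBit m 0 <;> simp
      · have h1 : Nat.testBit 1 i = false := by
          have := @Nat.testBit_two_pow 0 i
          simp at this
          rw [this]; simp; omega
        cases hm : Nat.testBit m 0 <;> simp [h1]
    rw [this]
    cases Nat.testBit m 0 <;> simp

theorem cond_iff (x : Int) (j : Nat) :
    (Int.land (x >>> (j : Int)) 1 ≠ 0) ↔ x.testBit j = true := by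
  rw [land_one_ne_zero, testBit_shiftRight_zero]

-- bits of 1 << j
theorem testBit_one_shiftLeft (j k : Nat) :
    Int.testBit ((1 : Int) <<< (j : Int)) k = decide (j = k) := by
  rw [Int.one_shiftLeft]
  show Nat.testBit (2 ^ j) k = decide (j = k)
  exact Nat.testBit_two_pow

-- bits of the 32-bit mask constant
theorem testBit_mask32 (k : Nat) :
    Int.testBit (4294967295 : Int) k = decide (k < 32) := by
  show Nat.testBit 4294967295 k = decide (k < 32)
  have : (4294967295 : Nat) = 2 ^ 32 - 1 := by norm_num
  rw [this, Nat.testBit_two_pow_sub_one]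

-- bits of one loop step of A
theorem step_testBit (new biten out : Int) (j k : Nat) :
    (applyBitenStep new biten out (j : Int)).testBit k =
      if j = k ∧ biten.testBit j then new.testBit j else out.testBit k := by
  unfold applyBitenStep
  by_cases hb : biten.testBit j = true
  · rw [if_pos ((cond_iff biten j).mpr hb)]
    by_cases hn : new.testBit j = true
    · rw [if_pos ((cond_iff new j).mpr hn)]
      rw [Int.testBit_lor, testBit_one_shiftLeft]
      by_cases hjk : j = k
      · subst hjk; simp [hb, hn]
      · simp [hjk, hb]
    · rw [if_neg (fun hc => hn ((cond_iff new j).mp hc))]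
      rw [Int.testBit_land, Int.testBit_lnot, testBit_one_shiftLeft]
      by_cases hjk : j = k
      · subst hjk
        simp only [Bool.not_eq_true] at hn
        simp [hb, hn]
      · simp [hjk, hb]
  · rw [if_neg (fun hc => hb ((cond_iff biten j).mp hc))]
    simp only [Bool.not_eq_true] at hb
    rw [if_neg (fun hc => by rw [hb] at hc; exact Bool.false_ne_true hc.2)]

-- invariant: after scanning bits 0..n-1, bit k of the accumulator
theorem loop_testBit (old new biten : Int) (n : Nat) (k : Nat) :
    ((List.range n).foldl (fun s (j : Nat) => applyBitenStep new biten s ((0 : Int) + (j : Int))) old).testBit k =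
      if k < n ∧ biten.testBit k then new.testBit k else old.testBit k := by
  induction n with
  | zero => simp
  | succ n ih =>
    rw [List.range_succ, List.foldl_append, List.foldl_cons, List.foldl_nil]
    rw [show ((0 : Int) + (n : Int)) = (n : Int) by ring]
    rw [step_testBit]
    by_cases hcond : n = k ∧ biten.testBit n = true
    · obtain ⟨hnk, hb⟩ := hcond
      subst hnk
      rw [if_pos ⟨rfl, hb⟩, if_pos ⟨Nat.lt_succ_self n, hb⟩]
    · rw [if_neg hcond, ih]
      by_cases hb : biten.testBit k = true
      · by_cases hk : k < n
        · simp [hk, hb, Nat.lt_succ_of_lt hk]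
        · have hne : k ≠ n := fun h => hcond ⟨h.symm, by rwa [h] at hb⟩
          have h2 : ¬ k < n + 1 := by omega
          simp [hk, h2]
      · simp only [Bool.not_eq_true] at hb
        simp [hb]

-- ===== VERDICT (by name: the statement is the Claim_ definition above) =====
theorem apply_biten_py_spec : Claim_equal_apply_biten_py := by
  intro old new biten _
  unfold Spec_apply_biten_py apply_biten_py apply_biten_py_alt
  rw [PySem.List.pyRange_one]
  rw [List.foldl_map]
  apply int_eq_of_testBit_eq
  intro k
  rw [loop_testBit]
  simp only [Int.testBit_lor, Int.testBit_land, Int.testBit_lnot, testBit_mask32]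
  by_cases hk : k < 32 <;> by_cases hb : biten.testBit k = true <;>
    simp [hk, hb]
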